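-- pv_equiv track=rewrite | github.com/nikita291097-maker/KAP_Slaughter | services/mqtt_ingest/main.py | decode_events
-- ===== SOURCE A (Python) =====
-- def decode_events(arr):
--     active = set()
--     for word_index, word in enumerate(arr):
--         for bit in range(16):
--             if word & (1 << bit):
--                 event_id = word_index * 16 + bit + 1
--                 active.add(event_id)
--     return active
-- ===== SOURCE B (Python) =====
-- def decode_events(arr):
--     active = set()
--     base = 0
--     for word in arr:
--         w = word & 0xFFFF
--         while w:
--             low = w & -w                      # isolate lowest set bit
--             active.add(base + low.bit_length())  # bit index + 1 offset folded into bit_length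
--             w &= w - 1                        # clear that bit
--         base += 16
--     return active
-- ===== Notes on version B (the rewrite author's own statement) =====
-- stated objective: alternative
-- what changed: Replaces the fixed 16-iteration mask test per word with a lowest-set-bit extraction loop (w & -w, bit_length, w &= w-1) over the 16-bit-masked word, so the inner loop runs once per set bit instead of 16 times per word.
import Mathlib
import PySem

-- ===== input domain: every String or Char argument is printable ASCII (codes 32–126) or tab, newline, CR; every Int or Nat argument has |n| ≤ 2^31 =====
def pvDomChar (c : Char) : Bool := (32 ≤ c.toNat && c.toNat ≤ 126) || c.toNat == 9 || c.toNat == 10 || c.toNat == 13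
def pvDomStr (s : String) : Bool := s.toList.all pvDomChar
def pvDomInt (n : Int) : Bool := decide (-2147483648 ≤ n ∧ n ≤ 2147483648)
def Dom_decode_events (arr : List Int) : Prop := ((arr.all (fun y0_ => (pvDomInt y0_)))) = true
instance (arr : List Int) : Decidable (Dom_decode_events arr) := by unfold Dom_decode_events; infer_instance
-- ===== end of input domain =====

-- B replaces A's fixed 16-test inner scan by a lowest-set-bit extraction loop over the masked
-- word, visiting only the set bits (objective: alternative algorithm, same asymptotic cost).

-- ===== PORT A =====
def decode_events (arr : List Int) : List Int :=
  (PySem.List.enumerate arr 0).foldl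
    (fun active wi_word =>
      (PySem.List.pyRange 0 16 1).foldl
        (fun active bit =>
          if PySem.Int.band wi_word.2 ((1 : Int) <<< bit.toNat) ≠ 0 then
            PySem.Set.add active (wi_word.1 * 16 + bit + 1)
          else active)
        active)
    PySem.Set.empty

-- ===== PORT B =====
-- 'while w:' loop of Source B; the fuel argument (w.toNat at entry) only makes it total:
-- each iteration strictly decreases w, so the fuel is never exhausted.
def decodeLoop : Nat → Int → Int → List Int → List Int
  | 0, _, _, active => active
  | fuel + 1, base, w, active =>
    if w = 0 then active
    else
      let low := PySem.Int.band w (-w)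
      decodeLoop fuel base (PySem.Int.band w (w - 1))
        (PySem.Set.add active (base + (PySem.Int.bitLength low : Int)))

def decode_events_alt (arr : List Int) : List Int :=
  (arr.foldl
    (fun (p : List Int × Int) word =>
      let w := PySem.Int.band word 65535
      (decodeLoop w.toNat p.2 w p.1, p.2 + 16))
    (PySem.Set.empty, 0)).1

-- ===== PRECONDITION & SPEC =====
def Spec_decode_events (arr : List Int) (out : List Int) : Prop := out = decode_events_alt arr
instance (arr : List Int) (out : List Int) : Decidable (Spec_decode_events arr out) := by unfold Spec_decode_events; infer_instance

-- ===== CLAIM (what is proved, stated in full; the proofs are below) =====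
def Claim_equal_decode_events : Prop := ∀ (arr : List Int), Dom_decode_events arr → Spec_decode_events arr (decode_events arr)

-- ===== LEMMAS AND PROOFS =====

-- ascending list of set-bit positions of w (proof-only specification)
def bitsList (w : Nat) : List Nat :=
  if h : w = 0 then []
  else (if w % 2 = 1 then [0] else []) ++ (bitsList (w / 2)).map (· + 1)
termination_by w
decreasing_by exact Nat.div_lt_self (Nat.pos_of_ne_zero h) (by norm_num)

theorem bitsList_zero : bitsList 0 = [] := by rw [bitsList]; simp

theorem bitsList_ne (w : Nat) (h : w ≠ 0) :
    bitsList w = (if w % 2 = 1 then [0] else []) ++ (bitsList (w / 2)).map (· + 1) := by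
  rw [bitsList]; simp [h]

-- 2^k - 1 - m is the bitwise complement of m inside k bits
theorem comp_testBit : ∀ (i k m : Nat), i < k → m < 2 ^ k →
    (2 ^ k - 1 - m).testBit i = !m.testBit i := by
  intro i
  induction i with
  | zero =>
    intro k m hik hm
    have hk : 2 ^ k % 2 = 0 := by
      have : (2:Nat) ∣ 2 ^ k := dvd_pow_self 2 (by omega)
      omega
    simp only [Nat.testBit_zero]
    rcases Nat.mod_two_eq_zero_or_one m with h | h <;>
      · have : (2 ^ k - 1 - m) % 2 = 1 - m % 2 := by omega
        simp [this, h]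
  | succ i ih =>
    intro k m hik hm
    obtain ⟨j, rfl⟩ : ∃ j, k = j + 1 := ⟨k - 1, by omega⟩
    have hp : 2 ^ (j + 1) = 2 * 2 ^ j := by ring
    have hdiv : (2 ^ (j + 1) - 1 - m) / 2 = 2 ^ j - 1 - m / 2 := by omega
    rw [Nat.testBit_add_one, Nat.testBit_add_one, hdiv]
    exact ih j (m / 2) (by omega) (by omega)

-- odd w: w &&& (w-1) clears exactly bit 0
theorem and_pred_odd (w : Nat) (h : w % 2 = 1) : w &&& (w - 1) = w - 1 := by
  apply Nat.eq_of_testBit_eq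
  intro i
  cases i with
  | zero =>
    have h0 : (w - 1) % 2 = 0 := by omega
    simp [Nat.testBit_zero, h0]
  | succ i =>
    rw [Nat.testBit_and]
    simp only [Nat.testBit_add_one]
    have : (w - 1) / 2 = w / 2 := by omega
    rw [this, Bool.and_self]

-- even w = 2v: clearing the lowest set bit commutes with the shift
theorem and_pred_even (v : Nat) (h : 0 < v) :
    (2 * v) &&& (2 * v - 1) = 2 * (v &&& (v - 1)) := by
  apply Nat.eq_of_testBit_eq
  intro i
  cases i with
  | zero =>
    have h1 : 2 * v % 2 = 0 := by omega
    have h2 : 2 * (v &&& (v - 1)) % 2 = 0 := by omega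
    simp [Nat.testBit_zero, h1, h2]
  | succ i =>
    rw [Nat.testBit_and]
    simp only [Nat.testBit_add_one]
    have h1 : 2 * v / 2 = v := by omega
    have h2 : (2 * v - 1) / 2 = v - 1 := by omega
    have h3 : 2 * (v &&& (v - 1)) / 2 = v &&& (v - 1) := by omega
    rw [h1, h2, h3, ← Nat.testBit_and]

theorem and_pred_lt (w : Nat) (h : 0 < w) : w &&& (w - 1) < w :=
  Nat.lt_of_le_of_lt Nat.and_le_right (by omega)

-- the lowest set bit: head of bitsList, and the bitLength of w - (w &&& (w-1))
theorem low_spec : ∀ w : Nat, 0 < w → ∃ t,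
    bitsList w = t :: bitsList (w &&& (w - 1)) ∧
    PySem.Int.bitLength ((w - (w &&& (w - 1)) : Nat) : Int) = t + 1 := by
  intro w
  induction w using Nat.strong_induction_on with
  | _ w ih =>
    intro hw
    rcases Nat.mod_two_eq_zero_or_one w with he | ho
    · -- even, w = 2v
      obtain ⟨v, rfl⟩ : ∃ v, w = 2 * v := ⟨w / 2, by omega⟩
      have hv : 0 < v := by omega
      obtain ⟨t, h1, h2⟩ := ih v (by omega) hv
      refine ⟨t + 1, ?_, ?_⟩
      · rw [and_pred_even v hv]
        rw [bitsList_ne (2 * v) (by omega)]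
        have : (2 * v) % 2 = 0 := by omega
        rw [if_neg (by omega), List.nil_append]
        have hdvd : 2 * v / 2 = v := by omega
        rw [hdvd, h1]
        by_cases hz : v &&& (v - 1) = 0
        · simp [hz, bitsList_zero]
        · rw [bitsList_ne (2 * (v &&& (v - 1))) (by omega)]
          rw [if_neg (by omega), List.nil_append]
          have : 2 * (v &&& (v - 1)) / 2 = v &&& (v - 1) := by omega
          rw [this, List.map_cons]
      · rw [and_pred_even v hv]
        have hlt := and_pred_lt v hv
        have hpos : 0 < v - (v &&& (v - 1)) := by omega
        have heq : (2 * v - 2 * (v &&& (v - 1)) : Nat) = 2 * (v - (v &&& (v - 1))) := by omega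
        rw [heq]
        rw [PySem.Int.bitLength_natCast (m := 2 * (v - (v &&& (v - 1)))) (by omega)]
        have : 2 * (v - (v &&& (v - 1))) / 2 = v - (v &&& (v - 1)) := by omega
        rw [this, h2]
    · -- odd
      refine ⟨0, ?_, ?_⟩
      · rw [and_pred_odd w ho, bitsList_ne w (by omega), if_pos ho]
        by_cases h1 : w = 1
        · subst h1; simp [bitsList_zero]
        · rw [bitsList_ne (w - 1) (by omega)]
          have : (w - 1) % 2 = 0 := by omega
          rw [if_neg (by omega), List.nil_append]
          have : (w - 1) / 2 = w / 2 := by omega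
          rw [this]
          rfl
      · rw [and_pred_odd w ho]
        have : (w - (w - 1) : Nat) = 1 := by omega
        rw [this]
        decide

-- B's while-loop computes the fold of Set.add over the ascending set-bit positions
theorem decodeLoop_spec : ∀ (w : Nat) (fuel : Nat), w ≤ fuel → ∀ (base : Int) (active : List Int),
    decodeLoop fuel base (w : Int) active =
      (bitsList w).foldl (fun ac t => PySem.Set.add ac (base + ((t + 1 : Nat) : Int))) active := by
  intro w
  induction w using Nat.strong_induction_on with
  | _ w ih =>
    intro fuel hf base active
    by_cases hw : w = 0
    · subst hw
      cases fuel <;> simp [decodeLoop, bitsList_zero]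
    · have hwpos : 0 < w := Nat.pos_of_ne_zero hw
      obtain ⟨f, rfl⟩ : ∃ f, fuel = f + 1 := ⟨fuel - 1, by omega⟩
      obtain ⟨t, h1, h2⟩ := low_spec w hwpos
      have hlow : PySem.Int.band (w : Int) (-(w : Int)) =
          ((w - (w &&& (w - 1)) : Nat) : Int) := by
        unfold PySem.Int.band
        rw [if_pos (by positivity), if_neg (by omega)]
        congr 1
        have : (-(-(w : Int)) - 1) = ((w - 1 : Nat) : Int) := by omega
        rw [this]
        simp
      have hnext : PySem.Int.band (w : Int) ((w : Int) - 1) =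
          ((w &&& (w - 1) : Nat) : Int) := by
        have : ((w : Int) - 1) = ((w - 1 : Nat) : Int) := by omega
        rw [this, PySem.Int.band_natCast]
      rw [show decodeLoop (f + 1) base (w : Int) active =
        (if (w : Int) = 0 then active
         else decodeLoop f base (PySem.Int.band (w : Int) ((w : Int) - 1))
           (PySem.Set.add active
             (base + (PySem.Int.bitLength (PySem.Int.band (w : Int) (-(w : Int))) : Int)))) from rfl]
      rw [if_neg (by omega), hlow, hnext, h2, h1, List.foldl_cons]
      have hle : w &&& (w - 1) ≤ w - 1 := Nat.and_le_right
      exact ih (w &&& (w - 1)) (and_pred_lt w hwpos) f (by omega) base _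

-- A's 16-test scan equals the fold over the set-bit positions, for any action g
theorem rangeFold_spec {α : Type} : ∀ (k : Nat) (w : Nat), w < 2 ^ k →
    ∀ (g : Nat → α → α) (active : α),
    (List.range k).foldl (fun ac b => if w.testBit b then g b ac else ac) active =
      (bitsList w).foldl (fun ac b => g b ac) active := by
  intro k
  induction k with
  | zero =>
    intro w hw g active
    interval_cases w
    simp [bitsList_zero]
  | succ k ih =>
    intro w hw g active
    rw [List.range_succ_eq_map, List.foldl_cons, List.foldl_map]
    have hdiv : w / 2 < 2 ^ k := by
      have h2 : w < 2 * 2 ^ k := by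
        calc w < 2 ^ (k + 1) := hw
          _ = 2 * 2 ^ k := by rw [pow_succ, Nat.mul_comm]
      exact Nat.div_lt_of_lt_mul h2
    simp only [Nat.succ_eq_add_one, Nat.testBit_add_one]
    rw [ih (w / 2) hdiv (fun b ac => g (b + 1) ac)]
    by_cases hz : w = 0
    · subst hz
      simp [bitsList_zero, Nat.testBit_zero]
    · rw [bitsList_ne w hz, List.foldl_append, List.foldl_map]
      have hinit : (if w.testBit 0 then g 0 active else active) =
          (if w % 2 = 1 then [0] else []).foldl (fun ac b => g b ac) active := by
        rcases Nat.mod_two_eq_zero_or_one w with he | ho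
        · rw [if_neg (show ¬ w % 2 = 1 by omega)]
          have hb0 : w.testBit 0 = false := by simp [Nat.testBit_zero, he]
          simp [hb0]
        · rw [if_pos ho]
          have hb0 : w.testBit 0 = true := by simp [Nat.testBit_zero, ho]
          simp [hb0]
      rw [hinit]

-- the port-A membership test, for bit positions below 16, reads bit k of (word & 0xFFFF)
theorem test_iff (word : Int) (k : Nat) (hk : k < 16) :
    (PySem.Int.band word ((1 : Int) <<< k) ≠ 0) ↔
      Nat.testBit ((PySem.Int.band word 65535).toNat) k := by
  have hshift : ((1 : Int) <<< k) = ((2 ^ k : Nat) : Int) := by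
    rw [Int.shiftLeft_eq]
    push_cast
    ring
  have hp : (0:Nat) < 2 ^ k := Nat.two_pow_pos k
  have h65535 : Nat.testBit 65535 k = true := by
    rw [show (65535 : Nat) = 2 ^ 16 - 1 from rfl, Nat.testBit_two_pow_sub_one]
    simp [hk]
  rcases le_or_gt 0 word with hw | hw
  · -- word ≥ 0
    rw [hshift, show (65535 : Int) = ((65535 : Nat) : Int) from rfl]
    obtain ⟨n, rfl⟩ : ∃ n : Nat, word = (n : Int) := ⟨word.toNat, by omega⟩
    rw [PySem.Int.band_natCast, PySem.Int.band_natCast, Int.toNat_natCast,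
      Nat.and_two_pow, Nat.testBit_and, h65535, Bool.and_true]
    cases hm : n.testBit k
    · simp
    · simp only [Bool.toNat_true, Nat.one_mul]
      constructor
      · intro _; trivial
      · intro _
        have : ((2 ^ k : Nat) : Int) ≠ 0 := by exact_mod_cast hp.ne'
        exact this
  · -- word < 0, word = -1 - m
    obtain ⟨m, rfl⟩ : ∃ m : Nat, word = -1 - (m : Int) := ⟨(-word - 1).toNat, by omega⟩
    have hband : ∀ bn : Nat, PySem.Int.band (-1 - (m : Int)) (bn : Int) =
        ((bn - (bn &&& m) : Nat) : Int) := by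
      intro bn
      unfold PySem.Int.band
      rw [if_neg (by omega), if_pos (by positivity)]
      congr 1
      have h1 : ((bn : Int)).toNat = bn := Int.toNat_natCast bn
      have h2 : (-(-1 - (m : Int)) - 1).toNat = m := by omega
      rw [h1, h2]
    rw [hshift, show (65535 : Int) = ((65535 : Nat) : Int) from rfl, hband, hband,
      Int.toNat_natCast]
    have hmod : (65535 : Nat) &&& m = m % 2 ^ 16 := by
      rw [Nat.and_comm]
      exact Nat.and_two_pow_sub_one_eq_mod m 16
    rw [hmod]
    have hcomp : (65535 - m % 2 ^ 16).testBit k = !(m % 2 ^ 16).testBit k := by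
      have := comp_testBit k 16 (m % 2 ^ 16) hk (Nat.mod_lt m (by norm_num))
      simpa using this
    rw [hcomp, Nat.testBit_mod_two_pow]
    have hdec : (decide (k < 16)) = true := by simp [hk]
    rw [hdec, Bool.true_and, Nat.two_pow_and]
    cases hm : m.testBit k
    · simp only [Bool.toNat_false, Nat.mul_zero, Nat.sub_zero, Bool.not_false]
      constructor
      · intro _; trivial
      · intro _
        have : ((2 ^ k : Nat) : Int) ≠ 0 := by exact_mod_cast hp.ne'
        exact this
    · simp

theorem band_65535_nonneg (word : Int) : 0 ≤ PySem.Int.band word 65535 := by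
  rw [PySem.Int.band_comm]
  exact PySem.Int.band_nonneg_of_nonneg_left word (by norm_num)

theorem band_65535_lt (word : Int) : (PySem.Int.band word 65535).toNat < 65536 := by
  rcases le_or_gt 0 word with hw | hw
  · obtain ⟨n, rfl⟩ : ∃ n : Nat, word = (n : Int) := ⟨word.toNat, by omega⟩
    rw [show (65535 : Int) = ((65535 : Nat) : Int) from rfl, PySem.Int.band_natCast,
      Int.toNat_natCast]
    have : n &&& 65535 ≤ 65535 := Nat.and_le_right
    omega
  · obtain ⟨m, rfl⟩ : ∃ m : Nat, word = -1 - (m : Int) := ⟨(-word - 1).toNat, by omega⟩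
    unfold PySem.Int.band
    rw [if_neg (by omega), if_pos (by norm_num)]
    omega

theorem pyRange16 : PySem.List.pyRange 0 16 1 = List.map (fun n : Nat => (n : Int)) (List.range 16) := by
  decide

-- the inner loop of A on one word equals one B step on (word & 0xFFFF)
theorem perWord (word wi base : Int) (hb : base = wi * 16) (active : List Int) :
    (PySem.List.pyRange 0 16 1).foldl
      (fun ac bit =>
        if PySem.Int.band word ((1 : Int) <<< bit.toNat) ≠ 0 then
          PySem.Set.add ac (wi * 16 + bit + 1)
        else ac)
      active =
    decodeLoop (PySem.Int.band word 65535).toNat base (PySem.Int.band word 65535) active := by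
  have hcast : ((PySem.Int.band word 65535).toNat : Int) = PySem.Int.band word 65535 :=
    Int.toNat_of_nonneg (band_65535_nonneg word)
  have hds := decodeLoop_spec ((PySem.Int.band word 65535).toNat)
    ((PySem.Int.band word 65535).toNat) le_rfl base active
  rw [hcast] at hds
  rw [hds]
  rw [pyRange16]
  simp only [List.foldl_map]
  have hcong : (List.range 16).foldl
      (fun ac (b : Nat) =>
        if PySem.Int.band word ((1 : Int) <<< (((b : Int)).toNat : Int)) ≠ 0 then
          PySem.Set.add ac (wi * 16 + (b : Int) + 1)
        else ac) active =
      (List.range 16).foldl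
      (fun ac (b : Nat) =>
        if ((PySem.Int.band word 65535).toNat).testBit b then
          PySem.Set.add ac (base + ((b + 1 : Nat) : Int))
        else ac) active := by
    apply PySem.List.foldl_congr_mem
    intro acc b hbmem
    have hb16 : b < 16 := List.mem_range.mp hbmem
    have ht := test_iff word b hb16
    rw [Int.toNat_natCast, Int.shiftLeft_natCast_right]
    have hval : wi * 16 + (b : Int) + 1 = base + ((b + 1 : Nat) : Int) := by
      rw [hb]; push_cast; ring
    rw [hval]
    by_cases hc : PySem.Int.band word ((1 : Int) <<< b) ≠ 0
    · rw [if_pos hc, if_pos (ht.mp hc)]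
    · rw [if_neg hc]
      have : ¬ ((PySem.Int.band word 65535).toNat).testBit b := fun h => hc (ht.mpr h)
      simp only [Bool.not_eq_true] at this
      rw [this]
      simp
  rw [hcong]
  exact rangeFold_spec 16 ((PySem.Int.band word 65535).toNat)
    (band_65535_lt word) (fun b ac => PySem.Set.add ac (base + ((b + 1 : Nat) : Int))) active

-- outer fold: enumerate-with-index vs running base accumulator
theorem outerFold : ∀ (arr : List Int) (s : Int) (active : List Int),
    (PySem.List.enumerate arr s).foldl
      (fun ac wi_word =>
        (PySem.List.pyRange 0 16 1).foldl
          (fun ac bit =>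
            if PySem.Int.band wi_word.2 ((1 : Int) <<< bit.toNat) ≠ 0 then
              PySem.Set.add ac (wi_word.1 * 16 + bit + 1)
            else ac)
          ac)
      active =
    (arr.foldl
      (fun (p : List Int × Int) word =>
        let w := PySem.Int.band word 65535
        (decodeLoop w.toNat p.2 w p.1, p.2 + 16))
      (active, s * 16)).1 := by
  intro arr
  induction arr with
  | nil => intro s active; simp [PySem.List.enumerate_nil]
  | cons word rest ih =>
    intro s active
    rw [PySem.List.enumerate_cons, List.foldl_cons, List.foldl_cons]
    rw [perWord word s (s * 16) rfl active]
    have hstep : (s * 16 + 16 : Int) = (s + 1) * 16 := by ring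
    simp only [hstep]
    exact ih (s + 1) _

-- ===== VERDICT (by name: the statement is the Claim_ definition above) =====
theorem decode_events_spec : Claim_equal_decode_events := by
  intro arr _
  unfold Spec_decode_events decode_events decode_events_alt
  have := outerFold arr 0 PySem.Set.empty
  simpa using this
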